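/- GENERATED by c/gen_decode.py: decode facts of the image, one per distinct instruction byte string. -/
import UserX.DecodeImage

#decode_all ProgX.Base.Dec
  "0fb65500"  -- movzx edx,BYTE PTR [rbp+0x0]
  "450fb62c24"  -- movzx r13d,BYTE PTR [r12]
  "4883eb01"  -- sub rbx,0x1
  "4889de"  -- mov rsi,rbx
  "488d5437ff"  -- lea rdx,[rdi+rsi*1-0x1]
  "4989d5"  -- mov r13,rdx
  "4c89e7"  -- mov rdi,r12
  "660f2f05c0dc0300"  -- comisd xmm0,QWORD PTR [rip+0x3dcc0]
  "7328"  -- jae 104248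
  "75cc"  -- jne 101905
  "7feb"  -- jg 100c06
  "b801000000"  -- mov eax,0x1
  "e811beffff"  -- call 100059
  "e8a9f6ffff"  -- call 100200
  "e95a010000"  -- jmp 102752
  "ebf4"  -- jmp 102752
  "f20f5805a7d70300"  -- addsd xmm0,QWORD PTR [rip+0x3d7a7]
  "f20f59c8"  -- mulsd xmm1,xmm0
  "f20f5e1d80e10300"  -- divsd xmm3,QWORD PTR [rip+0x3e180]
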